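-- pv_equiv track=rewrite | github.com/Abdullah-Niaz/Advent-of-Code | 2025/04_Day/code.py | process_grid
-- ===== SOURCE A (Python) =====
-- from typing import List
--
-- def can_access(grid: List[str], row: int, col: int) -> bool:
--     rolls = 0
--     neighbors_str = ''
--
--     if row > 0:
--         top_row = grid[row - 1]
--         start = max(0, col - 1)
--         end = start + (2 if col == 0 else 3)
--         neighbors_str += top_row[start:end]
--
--     current_row = grid[row]
--     start = max(0, col - 1)
--     end = start + (2 if col == 0 else 3)
--     neighbors_str += current_row[start:end]
--
--     if row < len(grid) - 1:
--         bottom_row = grid[row + 1]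
--         start = max(0, col - 1)
--         end = start + (2 if col == 0 else 3)
--         neighbors_str += bottom_row[start:end]
--
--     rolls = neighbors_str.count('@')
--     return (rolls - 1) < 4  # subtract self
--
-- def process_grid(grid: List[str]) -> List[str]:
--     result = []
--     for row_idx, row in enumerate(grid):
--         next_row = list(row)  # convert to list for mutability
--         for col_idx, element in enumerate(row):
--             if element == '@' and can_access(grid, row_idx, col_idx):
--                 next_row[col_idx] = '.'
--         result.append(''.join(next_row))
--     return result
-- ===== SOURCE B (Python) =====
-- from typing import List
--
-- def process_grid(grid: List[str]) -> List[str]: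
--     # Per-row prefix sums of '@' counts, then O(1) clamped-window queries.
--     prefs = []
--     for row in grid:
--         p = [0]
--         t = 0
--         for ch in row:
--             t += 1 if ch == '@' else 0
--             p.append(t)
--         prefs.append(p)
--
--     def window(rr: int, c: int) -> int:
--         if 0 <= rr < len(grid):
--             p = prefs[rr]
--             n = len(p) - 1
--             hi = min(c + 2, n)
--             lo = min(max(0, c - 1), n)
--             return p[hi] - p[lo]
--         return 0
--
--     out = []
--     for r, row in enumerate(grid):
--         chars = list(row)
--         for c, ch in enumerate(row):
--             if ch == '@':
--                 total = window(r - 1, c) + window(r, c) + window(r + 1, c)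
--                 if total - 1 < 4:
--                     chars[c] = '.'
--         out.append(''.join(chars))
--     return out
-- ===== Notes on version B (the rewrite author's own statement) =====
-- stated objective: alternative
-- what changed: B precomputes per-row prefix-sum tables of '@' counts once and answers each cell's clamped 3x3 neighbor count by O(1) subtraction of two prefix entries per row, instead of A's per-cell construction of a neighbor string from three slices and counting '@' in it.
import Mathlib
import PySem

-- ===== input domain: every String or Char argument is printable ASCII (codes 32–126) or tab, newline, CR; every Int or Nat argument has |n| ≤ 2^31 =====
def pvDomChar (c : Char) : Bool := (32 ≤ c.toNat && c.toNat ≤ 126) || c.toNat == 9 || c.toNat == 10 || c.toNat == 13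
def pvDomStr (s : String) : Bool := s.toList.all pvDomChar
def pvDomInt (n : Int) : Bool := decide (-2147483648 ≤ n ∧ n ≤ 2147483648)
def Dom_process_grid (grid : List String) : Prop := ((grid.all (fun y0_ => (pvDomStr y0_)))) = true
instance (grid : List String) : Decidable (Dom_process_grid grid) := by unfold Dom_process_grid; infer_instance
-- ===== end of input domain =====

-- B precomputes per-row prefix sums of '@' and answers each 3x3 window query in O(1),
-- instead of A's per-cell neighbor-string construction via three slices; same results.

-- ===== PORT A =====
-- s.count('@') for a single character is the number of occurrences, i.e. List.count on code points.
def can_access (grid : List String) (row col : Int) : Bool :=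
  let ns1 : List Char :=
    if row > 0 then
      let top := ((PySem.List.pyGet? grid (row - 1)).getD "").toList
      let start := max 0 (col - 1)
      PySem.List.slice top (some start) (some (start + (if col = 0 then 2 else 3)))
    else []
  let cur := ((PySem.List.pyGet? grid row).getD "").toList
  let start := max 0 (col - 1)
  let ns2 := PySem.List.slice cur (some start) (some (start + (if col = 0 then 2 else 3)))
  let ns3 : List Char :=
    if row < (grid.length : Int) - 1 then
      let bot := ((PySem.List.pyGet? grid (row + 1)).getD "").toList
      let start := max 0 (col - 1)
      PySem.List.slice bot (some start) (some (start + (if col = 0 then 2 else 3)))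
    else []
  let rolls : Int := ((ns1 ++ ns2 ++ ns3).count '@' : Int)
  rolls - 1 < 4

def process_grid (grid : List String) : List String :=
  (PySem.List.enumerate grid).foldl
    (fun result rp =>
      let next_row := (PySem.List.enumerate rp.2.toList).foldl
        (fun nr cp =>
          if cp.2 = '@' ∧ can_access grid rp.1 cp.1 then nr.set cp.1.toNat '.' else nr)
        rp.2.toList
      result ++ [String.ofList next_row])
    []

-- ===== PORT B =====
-- port of B's prefix-building loop: p = [0]; t = 0; for ch in row: t += 1 if ch=='@' else 0; p.append(t)
def pvPrefRow (s : List Char) : List Int :=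
  (s.foldl (fun (st : List Int × Int) ch =>
      let t := st.2 + (if ch = '@' then 1 else 0)
      (st.1 ++ [t], t)) ([0], 0)).1

def pvWindow (grid : List String) (prefs : List (List Int)) (rr c : Int) : Int :=
  if 0 ≤ rr ∧ rr < (grid.length : Int) then
    let p := (PySem.List.pyGet? prefs rr).getD []
    let n : Int := (p.length : Int) - 1
    let hi := min (c + 2) n
    let lo := min (max 0 (c - 1)) n
    ((PySem.List.pyGet? p hi).getD 0) - ((PySem.List.pyGet? p lo).getD 0)
  else 0

def process_grid_alt (grid : List String) : List String :=
  let prefs := grid.map (fun row => pvPrefRow row.toList)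
  (PySem.List.enumerate grid).foldl
    (fun out rp =>
      let chars := (PySem.List.enumerate rp.2.toList).foldl
        (fun cs cp =>
          if cp.2 = '@' then
            let total := pvWindow grid prefs (rp.1 - 1) cp.1
              + pvWindow grid prefs rp.1 cp.1
              + pvWindow grid prefs (rp.1 + 1) cp.1
            if total - 1 < 4 then cs.set cp.1.toNat '.' else cs
          else cs)
        rp.2.toList
      out ++ [String.ofList chars])
    []

-- ===== PRECONDITION & SPEC =====
def Spec_process_grid (grid : List String) (out : List String) : Prop := out = process_grid_alt grid
instance (grid : List String) (out : List String) : Decidable (Spec_process_grid grid out) := by unfold Spec_process_grid; infer_instance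

-- ===== CLAIM (what is proved, stated in full; the proofs are below) =====
def Claim_equal_process_grid : Prop := ∀ (grid : List String), Dom_process_grid grid → Spec_process_grid grid (process_grid grid)

-- ===== LEMMAS AND PROOFS =====

theorem pvPrefRow_aux (s : List Char) (acc : List Int) (t : Int) :
    (s.foldl (fun (st : List Int × Int) ch =>
      let u := st.2 + (if ch = '@' then 1 else 0)
      (st.1 ++ [u], u)) (acc, t)).1
      = acc ++ (List.range s.length).map (fun i => t + ((s.take (i+1)).count '@' : Int)) := by
  induction s generalizing acc t with
  | nil => simp
  | cons ch s ih =>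
    simp only [List.foldl_cons, List.length_cons, List.range_succ_eq_map]
    rw [ih]
    simp [List.count_cons, List.append_assoc, List.map_map, Function.comp_def]
    intro a _
    ring

theorem pvPrefRow_eq (s : List Char) :
    pvPrefRow s = (List.range (s.length + 1)).map (fun i => ((s.take i).count '@' : Int)) := by
  unfold pvPrefRow
  rw [pvPrefRow_aux]
  rw [List.range_succ_eq_map]
  simp [List.map_map, Function.comp_def]

theorem take_min_count (s : List Char) (i : Nat) :
    ((s.take (min i s.length)).count '@') = ((s.take i).count '@') := by
  rcases le_total i s.length with h | h
  · rw [min_eq_left h]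
  · rw [min_eq_right h, List.take_length, List.take_of_length_le h]

-- value of B's window query for a valid row index
theorem pvWindow_eq_count (grid : List String) (r c : Nat)
    (hr : r < grid.length) :
    pvWindow grid (grid.map (fun row => pvPrefRow row.toList)) (r : Int) (c : Int)
      = (((grid[r].toList.take (c + 2)).count '@' : Int)
          - ((grid[r].toList.take (c - 1)).count '@' : Int)) := by
  unfold pvWindow
  have hget : PySem.List.pyGet? (grid.map (fun row => pvPrefRow row.toList)) (r : Int)
      = some (pvPrefRow grid[r].toList) := by
    simp [hr]
  rw [if_pos (show (0:Int) ≤ (r:Int) ∧ (r:Int) < (grid.length:Int) from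
    ⟨Int.natCast_nonneg r, by exact_mod_cast hr⟩)]
  simp only [hget, Option.getD_some]
  set s := grid[r].toList with hs
  have hlen : (pvPrefRow s).length = s.length + 1 := by
    rw [pvPrefRow_eq]; simp
  have hn : ((pvPrefRow s).length : Int) - 1 = (s.length : Int) := by
    rw [hlen]; push_cast; ring
  rw [hn]
  have hhi : min ((c : Int) + 2) (s.length : Int) = ((min (c + 2) s.length : Nat) : Int) := by
    push_cast; omega
  have hlo : min (max 0 ((c : Int) - 1)) (s.length : Int) = ((min (c - 1) s.length : Nat) : Int) := by
    push_cast; omega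
  rw [hhi, hlo]
  have hval : ∀ i : Nat, i ≤ s.length →
      (PySem.List.pyGet? (pvPrefRow s) ((i : Nat) : Int)).getD 0 = ((s.take i).count '@' : Int) := by
    intro i hi
    rw [pvPrefRow_eq]
    simp [PySem.List.pyGet?_natCast, Nat.lt_succ_of_le hi]
  rw [hval _ (min_le_right _ _), hval _ (min_le_right _ _)]
  rw [take_min_count, take_min_count]

-- A's slice piece for one row, as a difference of prefix counts
theorem slice_piece_count (s : List Char) (c : Nat) :
    ((PySem.List.slice s (some (max 0 ((c : Int) - 1)))
        (some (max 0 ((c : Int) - 1) + (if (c : Int) = 0 then 2 else 3)))).count '@' : Int)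
      = ((s.take (c + 2)).count '@' : Int) - ((s.take (c - 1)).count '@' : Int) := by
  rcases Nat.eq_zero_or_pos c with hc | hc
  · subst hc
    norm_num
    try rw [show (2 : Int) = ((2 : Nat) : Int) by norm_num, PySem.List.slice_to_natCast]
    try simp
  · have h0 : max 0 ((c : Int) - 1) = ((c - 1 : Nat) : Int) := by push_cast [hc]; omega
    rw [h0, if_neg (by exact_mod_cast Nat.pos_iff_ne_zero.mp hc)]
    rw [show ((c - 1 : Nat) : Int) + 3 = (((c - 1) + 3 : Nat) : Int) by push_cast; ring,
      PySem.List.slice_natCast]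
    rw [show (c - 1) + 3 - (c - 1) = 3 from by omega]
    have h2 : (s.take (c + 2)).count '@'
        = (s.take (c - 1)).count '@' + (((s.drop (c - 1)).take 3).count '@') := by
      rw [show c + 2 = (c - 1) + 3 from by omega, List.take_add, List.count_append]
    omega

-- per-cell equality of the two conditions
theorem can_access_eq (grid : List String) (r c : Nat) (hr : r < grid.length) :
    can_access grid (r : Int) (c : Int)
      = decide ((pvWindow grid (grid.map (fun row => pvPrefRow row.toList)) ((r : Int) - 1) (c : Int)
          + pvWindow grid (grid.map (fun row => pvPrefRow row.toList)) (r : Int) (c : Int)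
          + pvWindow grid (grid.map (fun row => pvPrefRow row.toList)) ((r : Int) + 1) (c : Int)) - 1 < 4) := by
  unfold can_access
  set prefs := grid.map (fun row => pvPrefRow row.toList) with hprefs
  have hcur : PySem.List.pyGet? grid (r : Int) = some grid[r] := by
    simp [hr]
  have hmid : ((PySem.List.slice ((PySem.List.pyGet? grid (r : Int)).getD "").toList
      (some (max 0 ((c : Int) - 1)))
      (some (max 0 ((c : Int) - 1) + (if (c : Int) = 0 then 2 else 3)))).count '@' : Int)
      = pvWindow grid prefs (r : Int) (c : Int) := by
    rw [hcur, Option.getD_some, pvWindow_eq_count grid r c hr, slice_piece_count]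
  have htop : (((if (r : Int) > 0 then
        PySem.List.slice ((PySem.List.pyGet? grid ((r : Int) - 1)).getD "").toList
          (some (max 0 ((c : Int) - 1)))
          (some (max 0 ((c : Int) - 1) + (if (c : Int) = 0 then 2 else 3)))
      else [])).count '@' : Int) = pvWindow grid prefs ((r : Int) - 1) (c : Int) := by
    rcases Nat.eq_zero_or_pos r with h | h
    · subst h
      rw [if_neg (by norm_num)]
      unfold pvWindow
      rw [if_neg (by norm_num)]
      simp
    · have hlt : r - 1 < grid.length := by omega
      have hcast : (r : Int) - 1 = ((r - 1 : Nat) : Int) := by push_cast [h]; omega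
      rw [if_pos (by exact_mod_cast h), hcast]
      have hg : PySem.List.pyGet? grid ((r - 1 : Nat) : Int) = some grid[r - 1] := by
        simp [hlt]
      rw [hg, Option.getD_some, pvWindow_eq_count grid (r - 1) c hlt, slice_piece_count]
  have hbot : (((if (r : Int) < (grid.length : Int) - 1 then
        PySem.List.slice ((PySem.List.pyGet? grid ((r : Int) + 1)).getD "").toList
          (some (max 0 ((c : Int) - 1)))
          (some (max 0 ((c : Int) - 1) + (if (c : Int) = 0 then 2 else 3)))
      else [])).count '@' : Int) = pvWindow grid prefs ((r : Int) + 1) (c : Int) := by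
    by_cases h : r + 1 < grid.length
    · have hcast : (r : Int) + 1 = ((r + 1 : Nat) : Int) := by push_cast; ring
      rw [if_pos (show (r : Int) < (grid.length : Int) - 1 by omega), hcast]
      have hg : PySem.List.pyGet? grid ((r + 1 : Nat) : Int) = some grid[r + 1] := by
        rw [PySem.List.pyGet?_natCast]
        simp [h]
      rw [hg, Option.getD_some, pvWindow_eq_count grid (r + 1) c h, slice_piece_count]
    · rw [if_neg (show ¬ ((r : Int) < (grid.length : Int) - 1) by omega)]
      unfold pvWindow
      rw [if_neg (show ¬ ((0:Int) ≤ (r:Int) + 1 ∧ (r:Int) + 1 < (grid.length : Int)) by omega)]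
      simp
  have hsum : (((if (r : Int) > 0 then
        PySem.List.slice ((PySem.List.pyGet? grid ((r : Int) - 1)).getD "").toList
          (some (max 0 ((c : Int) - 1)))
          (some (max 0 ((c : Int) - 1) + (if (c : Int) = 0 then 2 else 3)))
      else [])
      ++ PySem.List.slice ((PySem.List.pyGet? grid (r : Int)).getD "").toList
          (some (max 0 ((c : Int) - 1)))
          (some (max 0 ((c : Int) - 1) + (if (c : Int) = 0 then 2 else 3)))
      ++ (if (r : Int) < (grid.length : Int) - 1 then
        PySem.List.slice ((PySem.List.pyGet? grid ((r : Int) + 1)).getD "").toList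
          (some (max 0 ((c : Int) - 1)))
          (some (max 0 ((c : Int) - 1) + (if (c : Int) = 0 then 2 else 3)))
      else [])).count '@' : Int)
      = pvWindow grid prefs ((r : Int) - 1) (c : Int)
        + pvWindow grid prefs (r : Int) (c : Int)
        + pvWindow grid prefs ((r : Int) + 1) (c : Int) := by
    rw [List.count_append, List.count_append]
    push_cast
    rw [htop, hmid, hbot]
  simp only [hsum]

theorem process_grid_spec' (grid : List String) : process_grid grid = process_grid_alt grid := by
  unfold process_grid process_grid_alt
  apply PySem.List.foldl_congr_mem
  intro acc rp hrp
  rcases (PySem.List.mem_enumerate_iff _ _ _).mp hrp with ⟨r, hr, hrp_eq⟩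
  subst hrp_eq
  simp only [zero_add]
  congr 3
  apply PySem.List.foldl_congr_mem
  intro cs cp hcp
  rcases (PySem.List.mem_enumerate_iff _ _ _).mp hcp with ⟨c, hc, hcp_eq⟩
  subst hcp_eq
  simp only [zero_add]
  rw [can_access_eq grid r c hr]
  by_cases hch : grid[r].toList[c] = '@'
  · simp only [hch, if_pos, true_and]
    by_cases hcond : (pvWindow grid (grid.map (fun row => pvPrefRow row.toList)) ((r : Int) - 1) (c : Int)
          + pvWindow grid (grid.map (fun row => pvPrefRow row.toList)) (r : Int) (c : Int)
          + pvWindow grid (grid.map (fun row => pvPrefRow row.toList)) ((r : Int) + 1) (c : Int)) - 1 < 4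
    · simp [hcond]
    · simp [hcond]
  · simp [hch]

-- ===== VERDICT (by name: the statement is the Claim_ definition above) =====
theorem process_grid_spec : Claim_equal_process_grid := by
  intro grid _
  unfold Spec_process_grid
  exact process_grid_spec' grid
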